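-- pv_equiv track=rewrite | github.com/chase1745/AdventOfCode2019 | 4/day4-2.py | containsExactDoubleDigit
-- ===== SOURCE A (Python) =====
-- def containsExactDoubleDigit(num):
--     prev = None
--     groupLen = 0
--     for n in str(num):
--         if n == prev:
--             groupLen += 1
--         elif groupLen == 1:
--             return True
--         else:
--             groupLen = 0
--
--         prev = n
--     if groupLen == 1:
--         return True
--     return False
-- ===== SOURCE B (Python) =====
-- def containsExactDoubleDigit(num):
--     def runLengths(s):
--         if not s:
--             return []
--         k = 1
--         while k < len(s) and s[k] == s[0]:
--             k += 1
--         return [k] + runLengths(s[k:])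
--     return any(r == 2 for r in runLengths(str(num)))
-- ===== Notes on version B (the rewrite author's own statement) =====
-- stated objective: alternative
-- what changed: Replaces A's running prev/groupLen state machine with early returns by a recursive run-length encoding of the digit string followed by a scan for a run of length exactly 2.
import Mathlib
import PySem

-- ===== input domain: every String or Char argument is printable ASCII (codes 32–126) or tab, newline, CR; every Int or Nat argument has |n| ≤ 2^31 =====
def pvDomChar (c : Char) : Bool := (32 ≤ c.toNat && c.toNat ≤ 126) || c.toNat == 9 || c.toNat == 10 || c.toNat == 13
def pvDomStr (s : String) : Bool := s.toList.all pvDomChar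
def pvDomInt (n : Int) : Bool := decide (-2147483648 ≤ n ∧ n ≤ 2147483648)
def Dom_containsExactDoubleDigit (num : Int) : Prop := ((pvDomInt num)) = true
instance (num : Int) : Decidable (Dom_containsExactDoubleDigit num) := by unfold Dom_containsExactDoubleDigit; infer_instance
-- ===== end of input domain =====

-- B replaces A's running prev/groupLen state machine by a recursive run-length
-- encoding of str(num) scanned for a run of length exactly 2 (objective: alternative).

-- ===== PORT A =====
-- A's for-loop with early return, as recursion over the remaining characters;
-- state = (prev : Option Char, groupLen : Int), exactly A's variables.
def pvLoopA (prev : Option Char) (groupLen : Int) : List Char → Bool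
  | [] => groupLen == 1
  | n :: rest =>
    if (some n == prev) then pvLoopA (some n) (groupLen + 1) rest
    else if groupLen == 1 then true
    else pvLoopA (some n) 0 rest

def containsExactDoubleDigit (num : Int) : Bool :=
  pvLoopA none 0 (PySem.Int.toStr num).toList

-- ===== PORT B =====
-- the inner `while k < len(s) and s[k] == s[0]` of Source B: number of further
-- leading characters equal to the first one
def pvPref (c : Char) : List Char → Nat
  | [] => 0
  | d :: rest => if d == c then pvPref c rest + 1 else 0

-- Source B's recursive runLengths(s): length of the first maximal run, then recurse on the rest
def pvRunLengths : List Char → List Int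
  | [] => []
  | c :: rest =>
      ((pvPref c rest : Int) + 1) :: pvRunLengths (rest.drop (pvPref c rest))
  termination_by l => l.length
  decreasing_by
    simp only [List.length_cons, List.length_drop]; omega

def containsExactDoubleDigit_alt (num : Int) : Bool :=
  (pvRunLengths (PySem.Int.toStr num).toList).any (fun r => r == 2)

-- ===== PRECONDITION & SPEC =====
def Spec_containsExactDoubleDigit (num : Int) (out : Bool) : Prop := out = containsExactDoubleDigit_alt num
instance (num : Int) (out : Bool) : Decidable (Spec_containsExactDoubleDigit num out) := by unfold Spec_containsExactDoubleDigit; infer_instance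

-- ===== CLAIM (what is proved, stated in full; the proofs are below) =====
def Claim_equal_containsExactDoubleDigit : Prop := ∀ (num : Int), Dom_containsExactDoubleDigit num → Spec_containsExactDoubleDigit num (containsExactDoubleDigit num)

-- ===== LEMMAS AND PROOFS =====

-- Core invariant: A's loop after having read a run of (groupLen+1) copies of c equals
-- "the current run (length pvPref c l + groupLen + 1) is exactly 2, or some later run is".
theorem pvLoopA_eq_runs (l : List Char) : ∀ (c : Char) (g : Int),
    pvLoopA (some c) g l =
      ((((pvPref c l : Int) + g + 1) == 2) ||
        (pvRunLengths (l.drop (pvPref c l))).any (fun r => r == 2)) := by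
  induction l with
  | nil =>
      intro c g
      simp only [pvLoopA, pvPref, List.drop_nil, pvRunLengths, List.any_nil,
        Bool.or_false]
      rw [Bool.eq_iff_iff]
      simp only [beq_iff_eq]
      push_cast
      omega
  | cons d rest ih =>
      intro c g
      by_cases hdc : d = c
      · subst hdc
        simp only [pvLoopA, beq_self_eq_true, if_pos, pvPref, List.drop_succ_cons]
        rw [ih d (g + 1)]
        have harith : ((pvPref d rest : Int) + (g + 1) + 1)
            = (((pvPref d rest + 1 : Nat) : Int) + g + 1) := by push_cast; ring
        rw [harith]
      · have hne : (some d == some c) = false := by simp [hdc]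
        simp only [pvLoopA, hne, if_false, pvPref, beq_iff_eq, hdc, if_false,
          List.drop_zero, Nat.cast_zero, zero_add]
        by_cases hg : g = 1
        · subst hg
          norm_num [pvRunLengths]
        · rw [if_neg (by simp : ¬(false = true)), if_neg hg]
          rw [ih d 0]
          have hgf : ((g + 1 : Int) == 2) = false := by
            simp only [beq_eq_false_iff_ne, ne_eq]; omega
          have harith : ((pvPref d rest : Int) + 0 + 1)
              = ((pvPref d rest : Int) + 1) := by ring
          simp [pvRunLengths, hgf, harith]

-- ===== VERDICT (by name: the statement is the Claim_ definition above) =====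
theorem containsExactDoubleDigit_spec : Claim_equal_containsExactDoubleDigit := by
  intro num _
  unfold Spec_containsExactDoubleDigit containsExactDoubleDigit containsExactDoubleDigit_alt
  cases h : (PySem.Int.toStr num).toList with
  | nil => simp [pvLoopA, pvRunLengths]
  | cons c rest =>
      have h0 : (some c == (none : Option Char)) = false := by simp
      have h1 : ((0 : Int) == 1) = false := by decide
      simp only [pvLoopA, h0, h1, if_false]
      rw [pvLoopA_eq_runs rest c 0]
      have harith : ((pvPref c rest : Int) + 0 + 1)
          = ((pvPref c rest : Int) + 1) := by ring
      simp [pvRunLengths, harith]
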